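-- pv_equiv track=rewrite | github.com/durgeshchoudhary37/DBSCAN_Project | funcs.py | fsfc
-- ===== SOURCE A (Python) =====
-- def fmid(dictionary):  #find max in a dictionary
--     maxi = 0
--     maxi_key = 0
--     for key in dictionary:
--         if dictionary[key] > maxi:
--             maxi = dictionary[key]
--             maxi_key = key
--     return maxi_key
--
-- def ckptc(temp_clusters, target):  #check if key is present in temp_cluster
--     temp_soln = list()
--     for key in temp_clusters:
--         if target in temp_clusters[key]:
--             temp_soln.append(key)
--     return temp_soln
--
-- def fsfc(final_clusters, temp_clusters):  #find solution to cluster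
--     fs = dict()
--     for i in range(len(final_clusters)):
--         solution = dict()
--         for j in range(len(final_clusters[i])):
--             soln = ckptc(temp_clusters, final_clusters[i][j])
--             if len(soln) == 0:
--                 fs[final_clusters[i][j]] = 0
--             else:
--                 for k in range(len(soln)):
--                     if soln[k] in solution:
--                         solution[soln[k]] += 1
--                     else:
--                         solution[soln[k]] = 1
--
--         res = fmid(solution)
--         try:
--             fs[res] = solution[res]
--         except KeyError:
--             continue
--
--     return fs
-- ===== SOURCE B (Python) =====
-- def fsfc(final_clusters, temp_clusters):
--     # inverted index: value -> keys of the temp clusters containing it (in key order)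
--     index = {}
--     for key, members in temp_clusters.items():
--         for v in dict.fromkeys(members):
--             index.setdefault(v, []).append(key)
--     fs = {}
--     for cluster in final_clusters:
--         counts = {}
--         for v in cluster:
--             ks = index.get(v, [])
--             if not ks:
--                 fs[v] = 0
--             else:
--                 for k in ks:
--                     counts[k] = counts.get(k, 0) + 1
--         if counts:
--             best_key, best_cnt = max(counts.items(), key=lambda kv: kv[1])
--             fs[best_key] = best_cnt
--     return fs
-- ===== Notes on version B (the rewrite author's own statement) =====
-- stated objective: faster
-- what changed: B builds an inverted index value->list of temp-cluster keys once and looks elements up in it, instead of A's rescan of every temp cluster's member list for every element of every final cluster, and picks the dominant key with max(counts.items(), key=count) instead of A's hand-rolled running-max over keys with repeated dict lookups.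
import Mathlib
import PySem

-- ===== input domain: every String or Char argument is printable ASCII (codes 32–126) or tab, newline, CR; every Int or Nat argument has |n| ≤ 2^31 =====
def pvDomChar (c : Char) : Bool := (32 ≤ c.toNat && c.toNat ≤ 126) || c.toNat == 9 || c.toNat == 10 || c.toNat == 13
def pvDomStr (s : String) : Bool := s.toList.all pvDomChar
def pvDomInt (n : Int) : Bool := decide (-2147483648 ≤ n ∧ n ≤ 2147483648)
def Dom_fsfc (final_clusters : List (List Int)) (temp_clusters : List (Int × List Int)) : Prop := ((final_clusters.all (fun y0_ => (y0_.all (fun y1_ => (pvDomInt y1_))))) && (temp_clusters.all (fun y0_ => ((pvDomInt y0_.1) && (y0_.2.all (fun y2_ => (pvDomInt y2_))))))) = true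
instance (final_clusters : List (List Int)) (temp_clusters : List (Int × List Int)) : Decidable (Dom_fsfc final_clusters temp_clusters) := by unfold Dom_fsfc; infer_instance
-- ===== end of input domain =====

-- B replaces A's per-element rescans of every temp cluster by an inverted index value → temp-cluster keys built once,
-- and the hand-rolled dictionary max by Python's max(items, key=count); objective: faster (asymptotic).


-- ===== PORT A =====
-- fmid(dictionary): running (maxi, maxi_key) over the keys, strict '>' so the FIRST key with the max value wins
def fmid (d : PySem.Dict Int Int) : Int :=
  (d.keys.foldl (fun (p : Int × Int) key =>
      if d.getD key 0 > p.1 then (d.getD key 0, key) else p) ((0 : Int), (0 : Int))).2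

-- ckptc(temp_clusters, target)
def ckptc (tc : PySem.Dict Int (List Int)) (target : Int) : List Int :=
  tc.keys.foldl (fun acc key => if (tc.getD key []).contains target then acc ++ [key] else acc) []

-- body of A's inner 'for k in range(len(soln))' counter update
def stepCntA (s : PySem.Dict Int Int) (k : Int) : PySem.Dict Int Int :=
  if s.contains k then s.insert k (s.getD k 0 + 1) else s.insert k 1

-- body of A's 'for j in range(len(final_clusters[i]))' over the pair state (fs, solution)
def stepElemA (tc : PySem.Dict Int (List Int)) (p : PySem.Dict Int Int × PySem.Dict Int Int) (x : Int) :
    PySem.Dict Int Int × PySem.Dict Int Int :=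
  let soln := ckptc tc x
  if soln.length = 0 then (p.1.insert x 0, p.2)
  else (p.1, (PySem.List.pyRange 0 (PySem.List.len soln)).foldl
      (fun s k => stepCntA s (PySem.List.pyGetD soln k 0)) p.2)

-- one iteration of A's outer loop: inner loop, then res = fmid(solution); fs[res] = solution[res] (KeyError → continue)
def stepClusterA (tc : PySem.Dict Int (List Int)) (fs : PySem.Dict Int Int) (cluster : List Int) :
    PySem.Dict Int Int :=
  let p := (PySem.List.pyRange 0 (PySem.List.len cluster)).foldl
      (fun q j => stepElemA tc q (PySem.List.pyGetD cluster j 0)) (fs, PySem.Dict.empty)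
  let res := fmid p.2
  match p.2.get? res with
  | some v => p.1.insert res v
  | none => p.1

def fsfc (final_clusters : List (List Int)) (temp_clusters : List (Int × List Int)) : List (Int × Int) :=
  ((PySem.List.pyRange 0 (PySem.List.len final_clusters)).foldl
      (fun fs i => stepClusterA (PySem.Dict.ofList temp_clusters) fs (PySem.List.pyGetD final_clusters i []))
      PySem.Dict.empty).items

-- ===== PORT B =====
-- inverted index: value → keys of the temp clusters containing it (in key order)
def buildIndex (temp_clusters : List (Int × List Int)) : PySem.Dict Int (List Int) :=
  (PySem.Dict.ofList temp_clusters).items.foldl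
    (fun idx kv => (PySem.List.dedup kv.2).foldl
        (fun idx v => idx.insert v (idx.getD v [] ++ [kv.1])) idx)
    PySem.Dict.empty

-- body of B's 'for v in cluster' over the pair state (fs, counts)
def stepElemB (idx : PySem.Dict Int (List Int)) (p : PySem.Dict Int Int × PySem.Dict Int Int) (v : Int) :
    PySem.Dict Int Int × PySem.Dict Int Int :=
  let ks := idx.getD v []
  if ks = [] then (p.1.insert v 0, p.2)
  else (p.1, ks.foldl (fun c k => c.modify k 0 (· + 1)) p.2)

-- one iteration of B's outer loop: count, then 'if counts: fs[k] = max count'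
def stepClusterB (idx : PySem.Dict Int (List Int)) (fs : PySem.Dict Int Int) (cluster : List Int) :
    PySem.Dict Int Int :=
  let p := cluster.foldl (stepElemB idx) (fs, PySem.Dict.empty)
  match PySem.List.max? p.2.items (fun kv => kv.2) with
  | some m => p.1.insert m.1 m.2
  | none => p.1

def fsfc_alt (final_clusters : List (List Int)) (temp_clusters : List (Int × List Int)) : List (Int × Int) :=
  (final_clusters.foldl (stepClusterB (buildIndex temp_clusters)) PySem.Dict.empty).items

-- ===== PRECONDITION & SPEC =====
def Spec_fsfc (final_clusters : List (List Int)) (temp_clusters : List (Int × List Int)) (out : List (Int × Int)) : Prop := out = fsfc_alt final_clusters temp_clusters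
instance (final_clusters : List (List Int)) (temp_clusters : List (Int × List Int)) (out : List (Int × Int)) : Decidable (Spec_fsfc final_clusters temp_clusters out) := by unfold Spec_fsfc; infer_instance

-- ===== CLAIM (what is proved, stated in full; the proofs are below) =====
def Claim_equal_fsfc : Prop := ∀ (final_clusters : List (List Int)) (temp_clusters : List (Int × List Int)), Dom_fsfc final_clusters temp_clusters → Spec_fsfc final_clusters temp_clusters (fsfc final_clusters temp_clusters)

-- ===== LEMMAS AND PROOFS =====

-- ckptc is a filter of the keys
theorem ckptc_eq_filter (tc : PySem.Dict Int (List Int)) (v : Int) :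
    ckptc tc v = tc.keys.filter (fun k => (tc.getD k []).contains v) := by
  unfold ckptc
  simpa using PySem.List.foldl_append_if_eq_filter (fun k => (tc.getD k []).contains v) tc.keys []

-- one temp cluster's (deduplicated) members, folded into the index
theorem index_inner (key : Int) (ms : List Int) (hnd : ms.Nodup) :
    ∀ (idx : PySem.Dict Int (List Int)) (v : Int),
      (ms.foldl (fun idx u => idx.insert u (idx.getD u [] ++ [key])) idx).getD v []
        = idx.getD v [] ++ (if v ∈ ms then [key] else []) := by
  induction ms with
  | nil => intro idx v; simp
  | cons m rest ih =>
      intro idx v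
      have hnd' : rest.Nodup := hnd.of_cons
      have hm : m ∉ rest := by
        have := List.nodup_cons.mp hnd; exact this.1
      simp only [List.foldl_cons]
      rw [ih hnd' _ v]
      by_cases hv : v = m
      · subst hv
        simp [if_neg (fun h => hm h)]
      · rw [PySem.Dict.getD_insert]
        simp [hv, List.mem_cons]

-- the whole index build: bucket of v = keys of items whose member list contains v
theorem index_fold (l : List (Int × List Int)) :
    ∀ (idx : PySem.Dict Int (List Int)) (v : Int),
      (l.foldl (fun idx kv => (PySem.List.dedup kv.2).foldl
          (fun idx u => idx.insert u (idx.getD u [] ++ [kv.1])) idx) idx).getD v []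
        = idx.getD v [] ++ ((l.filter (fun kv => kv.2.contains v)).map (·.1)) := by
  induction l with
  | nil => intro idx v; simp
  | cons kv rest ih =>
      intro idx v
      simp only [List.foldl_cons]
      rw [ih _ v, index_inner kv.1 (PySem.List.dedup kv.2) (PySem.List.nodup_dedup kv.2) idx v]
      by_cases hv : v ∈ kv.2
      · simp [hv]
      · simp [hv]

theorem buildIndex_getD (tcl : List (Int × List Int)) (v : Int) :
    (buildIndex tcl).getD v [] = ckptc (PySem.Dict.ofList tcl) v := by
  unfold buildIndex
  rw [index_fold, ckptc_eq_filter]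
  rw [PySem.Dict.items_eq_map_keys _ (PySem.Dict.nodup_keys_ofList tcl) []]
  rw [List.filter_map, List.map_map]
  simp [Function.comp_def]

-- A's counter update is Python's d[k] = d.get(k, 0) + 1
theorem stepCntA_eq_modify (s : PySem.Dict Int Int) (k : Int) :
    stepCntA s k = s.modify k 0 (· + 1) := by
  unfold stepCntA PySem.Dict.modify
  by_cases h : s.contains k
  · simp [h]
  · have h' : s.contains k = false := by simpa using h
    rw [PySem.Dict.getD_of_not_contains _ _ h']
    simp [h']

-- per-element bodies agree
theorem stepElem_eq (tcl : List (Int × List Int)) (p : PySem.Dict Int Int × PySem.Dict Int Int) (x : Int) :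
    stepElemA (PySem.Dict.ofList tcl) p x = stepElemB (buildIndex tcl) p x := by
  unfold stepElemA stepElemB
  rw [show ckptc (PySem.Dict.ofList tcl) x = (buildIndex tcl).getD x [] from (buildIndex_getD tcl x).symm]
  set ks := (buildIndex tcl).getD x [] with hks
  by_cases h : ks = []
  · simp [h]
  · have : ¬ ks.length = 0 := by simpa [List.length_eq_zero_iff] using h
    simp only [if_neg h, if_neg this]
    congr 1
    rw [PySem.List.foldl_pyRange_pyGetD ks 0 (fun s k => stepCntA s k) p.2 (le_refl 0)]
    simp only [Int.toNat_zero, List.drop_zero]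
    exact PySem.List.foldl_congr_mem ks _ _ p.2 (fun acc y _ => stepCntA_eq_modify acc y)

-- B's per-element body in product form
theorem stepElemB_prod (idx : PySem.Dict Int (List Int)) (p : PySem.Dict Int Int × PySem.Dict Int Int) (v : Int) :
    stepElemB idx p v =
      ((fun fs v => if idx.getD v [] = [] then fs.insert v 0 else fs) p.1 v,
       (fun c v => if idx.getD v [] = [] then c
          else (idx.getD v []).foldl (fun c k => c.modify k 0 (· + 1)) c) p.2 v) := by
  unfold stepElemB
  by_cases h : idx.getD v [] = [] <;> simp [h]

-- invariant: nodup keys and strictly positive values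
def PInv (d : PySem.Dict Int Int) : Prop := d.keys.Nodup ∧ ∀ q ∈ d.items, 0 < q.2

theorem PInv_modify (d : PySem.Dict Int Int) (k : Int) (h : PInv d) : PInv (d.modify k 0 (· + 1)) := by
  obtain ⟨hnd, hpos⟩ := h
  have hget : (0 : Int) ≤ d.getD k 0 := by
    cases hg : d.get? k with
    | none => simp [PySem.Dict.getD_eq_get?_getD, hg]
    | some w =>
        have := hpos (k, w) (PySem.Dict.mem_items_of_get?_eq_some d hg)
        simp only [PySem.Dict.getD_eq_get?_getD, hg, Option.getD_some]
        omega
  constructor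
  · have := PySem.Dict.nodup_keys_foldl_modify_key [k] (fun x => x) (0 : Int)
      (fun _ _ => (· + 1)) d hnd
    simpa using this
  · intro q hq
    unfold PySem.Dict.modify at hq
    rcases (PySem.Dict.mem_items_insert d k _ q).mp hq with h1 | h2
    · subst h1; simp only; omega
    · exact hpos q h2.1

theorem PInv_foldl_modify (ks : List Int) :
    ∀ (d : PySem.Dict Int Int), PInv d → PInv (ks.foldl (fun c k => c.modify k 0 (· + 1)) d) := by
  induction ks with
  | nil => intro d h; exact h
  | cons k rest ih => intro d h; exact ih _ (PInv_modify d k h)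

theorem PInv_empty : PInv PySem.Dict.empty := by
  constructor <;> simp [PySem.Dict.empty, PySem.Dict.keys]

-- B's per-cluster counting pass keeps the invariant
theorem PInv_gB (idx : PySem.Dict Int (List Int)) (cl : List Int) :
    ∀ (d : PySem.Dict Int Int), PInv d →
      PInv (cl.foldl (fun c v => if idx.getD v [] = [] then c
        else (idx.getD v []).foldl (fun c k => c.modify k 0 (· + 1)) c) d) := by
  induction cl with
  | nil => intro d h; exact h
  | cons v rest ih =>
      intro d h
      simp only [List.foldl_cons]
      apply ih
      by_cases hv : idx.getD v [] = []
      · simpa [hv] using h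
      · simpa [hv] using PInv_foldl_modify (idx.getD v []) d h

theorem PInv_counts (idx : PySem.Dict Int (List Int)) (cluster : List Int) (fs : PySem.Dict Int Int) :
    PInv (cluster.foldl (stepElemB idx) (fs, PySem.Dict.empty)).2 := by
  have hdec : cluster.foldl (stepElemB idx) (fs, PySem.Dict.empty) =
      (cluster.foldl (fun fs v => if idx.getD v [] = [] then fs.insert v 0 else fs) fs,
       cluster.foldl (fun c v => if idx.getD v [] = [] then c
          else (idx.getD v []).foldl (fun c k => c.modify k 0 (· + 1)) c) PySem.Dict.empty) := by
    rw [PySem.List.foldl_congr_mem cluster _ _ _ (fun acc x _ => stepElemB_prod idx acc x)]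
    exact PySem.List.foldl_prod_mk
      (fun (fs : PySem.Dict Int Int) (v : Int) => if idx.getD v [] = [] then fs.insert v 0 else fs)
      (fun (c : PySem.Dict Int Int) (v : Int) => if idx.getD v [] = [] then c
        else (idx.getD v []).foldl (fun c k => c.modify k 0 (· + 1)) c)
      cluster fs PySem.Dict.empty
  rw [hdec]
  exact PInv_gB idx cluster PySem.Dict.empty PInv_empty

-- the step of Python's max(items, key=snd), named for the lemmas below
def maxFoldStep (acc : Option (Int × Int)) (x : Int × Int) : Option (Int × Int) :=
  match acc with
  | none => some x
  | some m => if m.2 < x.2 then some x else some m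

theorem max?_eq_foldl_maxFoldStep (l : List (Int × Int)) :
    PySem.List.max? l (fun kv => kv.2) = l.foldl maxFoldStep none := by
  unfold PySem.List.max?
  apply PySem.List.foldl_congr_mem
  intro acc x _
  cases acc <;> rfl

theorem foldl_maxFoldStep_some (l : List (Int × Int)) :
    ∀ (m : Int × Int), ∃ w, l.foldl maxFoldStep (some m) = some w := by
  induction l with
  | nil => intro m; exact ⟨m, rfl⟩
  | cons q rest ih =>
      intro m
      simp only [List.foldl_cons, maxFoldStep]
      by_cases h : m.2 < q.2
      · rw [if_pos h]; exact ih q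
      · rw [if_neg h]; exact ih m


-- the running (maxi, maxi_key) pair tracks max? when all values are positive
theorem foldmax_rel (l : List (Int × Int)) (hpos : ∀ p ∈ l, 0 < p.2) :
    ∀ (acc : Option (Int × Int)) (a : Int × Int),
      ((acc = none ∧ a = (0, 0)) ∨ (∃ m, acc = some m ∧ a = (m.2, m.1) ∧ 0 < m.2)) →
      (let A := l.foldl (fun p q => if q.2 > p.1 then (q.2, q.1) else p) a
       let M := l.foldl maxFoldStep acc
       (M = none ∧ A = (0, 0)) ∨ (∃ m, M = some m ∧ A = (m.2, m.1) ∧ 0 < m.2)) := by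
  induction l with
  | nil => intro acc a h; exact h
  | cons q rest ih =>
      intro acc a h
      have hq : 0 < q.2 := hpos q (by simp)
      have hrest : ∀ p ∈ rest, 0 < p.2 := fun p hp => hpos p (by simp [hp])
      have ih' := ih hrest
      simp only [List.foldl_cons, maxFoldStep]
      rcases h with ⟨h1, h2⟩ | ⟨m, h1, h2, h3⟩
      · subst h1; subst h2
        apply ih'
        right
        exact ⟨q, rfl, by simp [hq], hq⟩
      · subst h1; subst h2
        apply ih'
        right
        by_cases hc : m.2 < q.2
        · exact ⟨q, by simp [hc], by simp [hc], hq⟩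
        · have : ¬ (q.2 > m.2) := hc
          exact ⟨m, by simp [hc], by simp [this], h3⟩

-- fmid as a fold over items
theorem fmid_items (d : PySem.Dict Int Int) (hnd : d.keys.Nodup) :
    fmid d = (d.items.foldl (fun (p : Int × Int) q => if q.2 > p.1 then (q.2, q.1) else p) ((0:Int), (0:Int))).2 := by
  unfold fmid
  rw [PySem.Dict.items_eq_map_keys d hnd 0, List.foldl_map]

-- A's tail (fmid + try) equals B's tail (max over items) on a PInv dictionary
theorem tail_eq (d : PySem.Dict Int Int) (fs : PySem.Dict Int Int) (h : PInv d) :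
    (match d.get? (fmid d) with
      | some v => fs.insert (fmid d) v
      | none => fs)
    = (match PySem.List.max? d.items (fun kv => kv.2) with
      | some m => fs.insert m.1 m.2
      | none => fs) := by
  obtain ⟨hnd, hpos⟩ := h
  have hrel := foldmax_rel d.items hpos none ((0:Int), (0:Int)) (Or.inl ⟨rfl, rfl⟩)
  simp only at hrel
  have hmax := max?_eq_foldl_maxFoldStep d.items
  rcases hrel with ⟨h1, h2⟩ | ⟨m, h1, h2, _⟩
  · rw [hmax, h1]
    have hfm : fmid d = 0 := by rw [fmid_items d hnd, h2]
    have hempty : d.items = [] := by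
      cases hi : d.items with
      | nil => rfl
      | cons p rest =>
          exfalso
          rw [hi] at h1
          simp only [List.foldl_cons, maxFoldStep] at h1
          obtain ⟨w, hw⟩ := foldl_maxFoldStep_some rest p
          rw [hw] at h1
          cases h1
    have : d.get? (fmid d) = none := by
      unfold PySem.Dict.get?
      rw [hempty]; rfl
    rw [this]
  · rw [hmax, h1]
    have hfm : fmid d = m.1 := by rw [fmid_items d hnd, h2]
    have hmem : m ∈ d.items := PySem.List.max?_mem (xs := d.items) (key := fun kv => kv.2) (by rw [hmax]; exact h1)
    have hget : d.get? m.1 = some m.2 := PySem.Dict.get?_of_mem_items d (k := m.1) (v := m.2) (by simpa using hmem) hnd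
    rw [hfm, hget]

-- per-cluster bodies agree
theorem stepCluster_eq (tcl : List (Int × List Int)) (fs : PySem.Dict Int Int) (cluster : List Int) :
    stepClusterA (PySem.Dict.ofList tcl) fs cluster = stepClusterB (buildIndex tcl) fs cluster := by
  unfold stepClusterA stepClusterB
  rw [PySem.List.foldl_pyRange_pyGetD cluster 0 (stepElemA (PySem.Dict.ofList tcl)) (fs, PySem.Dict.empty) (le_refl 0)]
  simp only [Int.toNat_zero, List.drop_zero]
  rw [PySem.List.foldl_congr_mem cluster _ _ _ (fun acc x _ => stepElem_eq tcl acc x)]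
  exact tail_eq _ _ (PInv_counts (buildIndex tcl) cluster fs)

-- ===== VERDICT (by name: the statement is the Claim_ definition above) =====
theorem fsfc_spec : Claim_equal_fsfc := by
  intro fc tcl _
  unfold Spec_fsfc fsfc fsfc_alt
  rw [PySem.List.foldl_pyRange_pyGetD fc [] (stepClusterA (PySem.Dict.ofList tcl)) PySem.Dict.empty (le_refl 0)]
  simp only [Int.toNat_zero, List.drop_zero]
  rw [PySem.List.foldl_congr_mem fc _ _ _ (fun acc x _ => stepCluster_eq tcl acc x)]
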